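-- pv_equiv track=rewrite | github.com/chimenkamp/Logic-Accelerated-DPN-Discovery | dpn_discovery/regions.py | _is_region
-- ===== SOURCE A (Python) =====
-- def _enter(
--     event: str,
--     region: frozenset[str],
--     ts_transitions: set[tuple[str, str, str]],
-- ) -> bool:
--     """Def 2.1 -- enter(e, S'):  exists(s,e,s')  in  T : s  not in  S'  and  s'  in  S'."""
--     for src, evt, tgt in ts_transitions:
--         if evt == event and src not in region and tgt in region:
--             return True
--     return False
--
-- def _exit(
--     event: str,
--     region: frozenset[str],
--     ts_transitions: set[tuple[str, str, str]],
-- ) -> bool: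
--     """Def 2.1 -- exit(e, S'):  exists(s,e,s')  in  T : s  in  S'  and  s'  not in  S'."""
--     for src, evt, tgt in ts_transitions:
--         if evt == event and src in region and tgt not in region:
--             return True
--     return False
--
-- def _in(
--     event: str,
--     region: frozenset[str],
--     ts_transitions: set[tuple[str, str, str]],
-- ) -> bool:
--     """Def 2.1 -- in(e, S'):  exists(s,e,s')  in  T : s  in  S'  and  s'  in  S'."""
--     for src, evt, tgt in ts_transitions:
--         if evt == event and src in region and tgt in region:
--             return True
--     return False
--
-- def _out(
--     event: str,
--     region: frozenset[str],
--     ts_transitions: set[tuple[str, str, str]],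
-- ) -> bool:
--     """Def 2.1 -- out(e, S'):  exists(s,e,s')  in  T : s  not in  S'  and  s'  not in  S'."""
--     for src, evt, tgt in ts_transitions:
--         if evt == event and src not in region and tgt not in region:
--             return True
--     return False
--
-- def _is_region(
--     candidate: frozenset[str],
--     events: set[str],
--     ts_transitions: set[tuple[str, str, str]],
-- ) -> bool:
--     """Def 2.2 -- Check whether *candidate* is a region of the TS.
--
--     A set of states r <= S is a region iff for each event e  in  E,
--     exactly one crossing type holds.  Concretely:
--       1) enter(e,r) => not in(e,r)  and  not out(e,r)  and  not exit(e,r)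
--       2) exit(e,r)  => not in(e,r)  and  not out(e,r)  and  not enter(e,r)
--       3) in(e,r) and out(e,r) cannot both hold (non-uniform internal/external)
--     """
--     for e in events:
--         en = _enter(e, candidate, ts_transitions)
--         ex = _exit(e, candidate, ts_transitions)
--         i = _in(e, candidate, ts_transitions)
--         o = _out(e, candidate, ts_transitions)
--
--         # Condition 1: if enter then no in, no out, no exit
--         if en and (i or o or ex):
--             return False
--         # Condition 2: if exit then no in, no out, no enter
--         if ex and (i or o or en):
--             return False
--         # Condition 3 (Def 2.2): in and out are mutually exclusive.
--         # If some e-transitions stay inside r AND some stay outside r,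
--         # the event has non-uniform crossing behaviour.
--         if i and o:
--             return False
--     return True
-- ===== SOURCE B (Python) =====
-- def _is_region(
--     candidate: frozenset[str],
--     events: set[str],
--     ts_transitions: set[tuple[str, str, str]],
-- ) -> bool:
--     """Single pass over the transitions: classify each transition once into its
--     event's (enter, exit, in, out) flag quadruple, then check the region
--     conditions per event.  O(|T| + |E|) instead of A's O(|E| * |T|)."""
--     flags = {}
--     for src, evt, tgt in ts_transitions:
--         s_in = src in candidate
--         t_in = tgt in candidate
--         en, ex, i, o = flags.get(evt, (False, False, False, False))
--         flags[evt] = (en or (not s_in and t_in),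
--                       ex or (s_in and not t_in),
--                       i or (s_in and t_in),
--                       o or (not s_in and not t_in))
--
--     def ok(e):
--         en, ex, i, o = flags.get(e, (False, False, False, False))
--         return (not (en and (i or o or ex))
--                 and not (ex and (i or o or en))
--                 and not (i and o))
--
--     return all(ok(e) for e in events)
-- ===== Notes on version B (the rewrite author's own statement) =====
-- stated objective: faster
-- what changed: Replaces A's four full scans of the transitions per event with a single pass that builds a dict of per-event (enter, exit, in, out) flags, then checks each event by one dict lookup.
import Mathlib
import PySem

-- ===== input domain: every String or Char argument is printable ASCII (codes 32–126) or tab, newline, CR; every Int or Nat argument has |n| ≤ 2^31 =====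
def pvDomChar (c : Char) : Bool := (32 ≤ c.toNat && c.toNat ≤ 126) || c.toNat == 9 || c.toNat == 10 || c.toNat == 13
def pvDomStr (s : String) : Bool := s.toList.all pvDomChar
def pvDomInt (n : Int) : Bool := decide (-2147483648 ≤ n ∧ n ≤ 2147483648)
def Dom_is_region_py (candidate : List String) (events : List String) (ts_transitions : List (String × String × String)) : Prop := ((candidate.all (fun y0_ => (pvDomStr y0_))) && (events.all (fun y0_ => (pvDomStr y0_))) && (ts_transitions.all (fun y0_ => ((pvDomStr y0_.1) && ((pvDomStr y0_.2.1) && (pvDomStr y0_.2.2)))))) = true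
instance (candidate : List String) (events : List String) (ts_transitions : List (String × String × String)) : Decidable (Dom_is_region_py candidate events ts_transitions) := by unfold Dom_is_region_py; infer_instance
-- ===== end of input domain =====

-- B replaces A's four per-event scans of the transitions with one classifying pass
-- building a per-event flag dict (objective: faster, asymptotic).


-- ===== PORT A =====
-- _enter: first transition with evt = event, src ∉ region, tgt ∈ region
def enterA (event : String) (region : List String) : List (String × String × String) → Bool
  | [] => false
  | (src, evt, tgt) :: rest =>
    if evt == event && !(region.contains src) && region.contains tgt then true
    else enterA event region rest

def exitA (event : String) (region : List String) : List (String × String × String) → Bool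
  | [] => false
  | (src, evt, tgt) :: rest =>
    if evt == event && region.contains src && !(region.contains tgt) then true
    else exitA event region rest

def inA (event : String) (region : List String) : List (String × String × String) → Bool
  | [] => false
  | (src, evt, tgt) :: rest =>
    if evt == event && region.contains src && region.contains tgt then true
    else inA event region rest

def outA (event : String) (region : List String) : List (String × String × String) → Bool
  | [] => false
  | (src, evt, tgt) :: rest =>
    if evt == event && !(region.contains src) && !(region.contains tgt) then true
    else outA event region rest

-- the main loop over events, with A's three early returns
def loopA (candidate : List String) (ts : List (String × String × String)) : List String → Bool
  | [] => true
  | e :: es =>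
    let en := enterA e candidate ts
    let ex := exitA e candidate ts
    let i := inA e candidate ts
    let o := outA e candidate ts
    if en && (i || o || ex) then false
    else if ex && (i || o || en) then false
    else if i && o then false
    else loopA candidate ts es

def is_region_py (candidate : List String) (events : List String) (ts_transitions : List (String × String × String)) : Bool :=
  loopA candidate ts_transitions events

-- ===== PORT B =====
-- one classifying step per transition, accumulating per-event flag quadruples
def stepB (candidate : List String) (d : PySem.Dict String (Bool × Bool × Bool × Bool))
    (tr : String × String × String) : PySem.Dict String (Bool × Bool × Bool × Bool) :=
  let sIn := candidate.contains tr.1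
  let tIn := candidate.contains tr.2.2
  let f := d.getD tr.2.1 (false, false, false, false)
  d.insert tr.2.1 (f.1 || (!sIn && tIn), f.2.1 || (sIn && !tIn),
                   f.2.2.1 || (sIn && tIn), f.2.2.2 || (!sIn && !tIn))

def is_region_py_alt (candidate : List String) (events : List String) (ts_transitions : List (String × String × String)) : Bool :=
  let flags := ts_transitions.foldl (stepB candidate) PySem.Dict.empty
  events.all (fun e =>
    let f := flags.getD e (false, false, false, false)
    !(f.1 && (f.2.2.1 || f.2.2.2 || f.2.1)) &&
    (!(f.2.1 && (f.2.2.1 || f.2.2.2 || f.1)) &&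
     !(f.2.2.1 && f.2.2.2)))

-- ===== PRECONDITION & SPEC =====
def Spec_is_region_py (candidate : List String) (events : List String) (ts_transitions : List (String × String × String)) (out : Bool) : Prop := out = is_region_py_alt candidate events ts_transitions
instance (candidate : List String) (events : List String) (ts_transitions : List (String × String × String)) (out : Bool) : Decidable (Spec_is_region_py candidate events ts_transitions out) := by unfold Spec_is_region_py; infer_instance

-- ===== CLAIM (what is proved, stated in full; the proofs are below) =====
def Claim_equal_is_region_py : Prop := ∀ (candidate : List String) (events : List String) (ts_transitions : List (String × String × String)), Dom_is_region_py candidate events ts_transitions → Spec_is_region_py candidate events ts_transitions (is_region_py candidate events ts_transitions)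

-- ===== LEMMAS AND PROOFS =====

-- the flag quadruple the B-side fold stores for event e equals the four A-side scans,
-- ORed onto whatever the accumulator dict already held for e
theorem foldl_stepB_getD (cand : List String) (ts : List (String × String × String)) :
    ∀ (d : PySem.Dict String (Bool × Bool × Bool × Bool)) (e : String),
      (List.foldl (stepB cand) d ts).getD e (false, false, false, false) =
        (let f := d.getD e (false, false, false, false)
         (f.1 || enterA e cand ts, f.2.1 || exitA e cand ts,
          f.2.2.1 || inA e cand ts, f.2.2.2 || outA e cand ts)) := by
  induction ts with
  | nil => intro d e; simp [enterA, exitA, inA, outA]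
  | cons tr rest ih =>
    intro d e
    obtain ⟨src, evt, tgt⟩ := tr
    rw [List.foldl_cons, ih]
    by_cases h : e = evt
    · subst h
      simp only [stepB, PySem.Dict.getD_insert, enterA, exitA, inA, outA,
        beq_self_eq_true, Bool.true_and]
      cases hc1 : cand.contains src <;> cases hc2 : cand.contains tgt <;> simp
    · have hne : (evt == e) = false := beq_eq_false_iff_ne.mpr (fun hh => h hh.symm)
      simp only [stepB, PySem.Dict.getD_insert, if_neg h, enterA, exitA, inA, outA]
      simp [hne]

-- A's event loop is the all-quantifier B uses
theorem loopA_eq_all (cand : List String) (ts : List (String × String × String)) :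
    ∀ es : List String,
      loopA cand ts es = es.all (fun e =>
        !(enterA e cand ts && (inA e cand ts || outA e cand ts || exitA e cand ts)) &&
        (!(exitA e cand ts && (inA e cand ts || outA e cand ts || enterA e cand ts)) &&
         !(inA e cand ts && outA e cand ts))) := by
  intro es
  induction es with
  | nil => rfl
  | cons e es ih =>
    simp only [loopA, List.all_cons, ih]
    cases enterA e cand ts <;> cases exitA e cand ts <;>
      cases inA e cand ts <;> cases outA e cand ts <;> simp

-- ===== VERDICT (by name: the statement is the Claim_ definition above) =====
theorem is_region_py_spec : Claim_equal_is_region_py := by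
  intro cand events ts _
  unfold Spec_is_region_py is_region_py is_region_py_alt
  rw [loopA_eq_all]
  congr 1
  funext e
  rw [foldl_stepB_getD]
  simp [PySem.Dict.getD_empty]
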